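-- pv_equiv track=rewrite | github.com/Pamphlett/DINO_Drifting | build_opendv_subset_lang_cache.py | distribute_targets
-- ===== SOURCE A (Python) =====
-- from typing import Dict, Iterable, List, Optional
--
-- def distribute_targets(total_target: Optional[int], file_count: int) -> List[Optional[int]]:
--     if total_target is None:
--         return [None] * file_count
--     base = total_target // file_count
--     remainder = total_target % file_count
--     targets = []
--     for idx in range(file_count):
--         targets.append(base + (1 if idx < remainder else 0))
--     return targets
-- ===== SOURCE B (Python) =====
-- from typing import List, Optional
--
-- def distribute_targets(total_target: Optional[int], file_count: int) -> List[Optional[int]]: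
--     if total_target is None:
--         return [None] * file_count
--     out = []
--     remaining = total_target
--     n = file_count
--     while n > 0:
--         share = -((-remaining) // n)  # ceiling of an even split of what is left
--         out.append(share)
--         remaining -= share
--         n -= 1
--     return out
-- ===== Notes on version B (the rewrite author's own statement) =====
-- stated objective: alternative
-- what changed: Greedy single pass: each file receives the ceiling of an even split of the remaining total, updating a running remainder, instead of precomputing base=//, remainder=% and branching per index.
import Mathlib
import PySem

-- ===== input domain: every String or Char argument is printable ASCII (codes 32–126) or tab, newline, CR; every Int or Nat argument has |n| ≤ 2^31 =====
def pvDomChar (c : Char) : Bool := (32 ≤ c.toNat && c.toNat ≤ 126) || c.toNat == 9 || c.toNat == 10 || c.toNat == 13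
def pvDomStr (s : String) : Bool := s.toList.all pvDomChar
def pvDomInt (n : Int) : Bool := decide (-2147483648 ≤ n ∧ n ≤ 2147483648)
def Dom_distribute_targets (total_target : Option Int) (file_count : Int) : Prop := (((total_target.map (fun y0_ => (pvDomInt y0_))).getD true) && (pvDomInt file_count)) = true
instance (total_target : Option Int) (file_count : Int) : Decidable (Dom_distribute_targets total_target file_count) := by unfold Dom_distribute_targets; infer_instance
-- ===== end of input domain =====

-- B is a greedy single pass: each file gets the ceiling of an even split of what remains; no base/remainder precomputation (alternative algorithm, same cost).

-- ===== PORT A =====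
def distribute_targets (total_target : Option Int) (file_count : Int) : List (Option Int) :=
  match total_target with
  | none => List.replicate file_count.toNat (none : Option Int)
  | some total =>
    let base := PySem.Int.floordiv total file_count
    let remainder := PySem.Int.mod total file_count
    (PySem.List.pyRange 0 file_count 1).foldl
      (fun targets idx => targets ++ [some (base + (if idx < remainder then 1 else 0))]) []

-- ===== PORT B =====
-- the while loop of Source B: state (remaining, n, out); stops when n ≤ 0
def pvGoB (remaining : Int) (n : Int) (out : List (Option Int)) : List (Option Int) :=
  if _h : n ≤ 0 then out
  else
    let share := -(PySem.Int.floordiv (-remaining) n)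
    pvGoB (remaining - share) (n - 1) (out ++ [some share])
termination_by n.toNat
decreasing_by omega

def distribute_targets_alt (total_target : Option Int) (file_count : Int) : List (Option Int) :=
  match total_target with
  | none => List.replicate file_count.toNat (none : Option Int)
  | some total => pvGoB total file_count []

-- ===== PRECONDITION & SPEC =====
-- A raises ZeroDivisionError at '//' when total_target is an int and file_count = 0; excluded.
def Pre_distribute_targets (total_target : Option Int) (file_count : Int) : Prop :=
  total_target = none ∨ file_count ≠ 0
instance (total_target : Option Int) (file_count : Int) : Decidable (Pre_distribute_targets total_target file_count) := by unfold Pre_distribute_targets; infer_instance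
def pvWitness_distribute_targets : Option Int × Int := (some 10, 3)

def Spec_distribute_targets (total_target : Option Int) (file_count : Int) (out : List (Option Int)) : Prop := out = distribute_targets_alt total_target file_count
instance (total_target : Option Int) (file_count : Int) (out : List (Option Int)) : Decidable (Spec_distribute_targets total_target file_count out) := by unfold Spec_distribute_targets; infer_instance

-- ===== CLAIM (what is proved, stated in full; the proofs are below) =====
def Claim_equal_distribute_targets : Prop := ∀ (total_target : Option Int) (file_count : Int), Dom_distribute_targets total_target file_count → Pre_distribute_targets total_target file_count → Spec_distribute_targets total_target file_count (distribute_targets total_target file_count)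

-- ===== LEMMAS AND PROOFS =====

-- A's range mapped through a threshold test is two replicated blocks
lemma range_map_ite_blocks (a b : Option Int) (r n : Nat) (h : r ≤ n) :
    (List.range n).map (fun (k : Nat) => if (k : Int) < (r : Int) then a else b)
      = List.replicate r a ++ List.replicate (n - r) b := by
  induction n with
  | zero =>
    have : r = 0 := Nat.le_zero.mp h
    simp [this]
  | succ n ih =>
    rcases Nat.lt_or_ge n r with hn | hn
    · have hr : r = n + 1 := Nat.le_antisymm h hn
      subst hr
      have : ∀ k ∈ List.range (n+1), (fun (k : Nat) => if (k : Int) < ((n+1 : Nat) : Int) then a else b) k = a := by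
        intro k hk
        have hklt := List.mem_range.mp hk
        have hc : (k : Int) < ((n+1 : Nat) : Int) := by exact_mod_cast hklt
        show (if (k : Int) < ((n+1 : Nat) : Int) then a else b) = a
        rw [if_pos hc]
      rw [List.map_congr_left this]
      simp [List.map_const']
    · rw [List.range_succ, List.map_append, ih hn]
      have : ¬ ((n : Int) < (r : Int)) := by exact_mod_cast Nat.not_lt.mpr hn
      have hsub : n + 1 - r = (n - r) + 1 := by omega
      simp [Nat.not_lt.mpr hn, hsub, List.replicate_succ', List.append_assoc]

-- A equals the two-block form for positive file_count
lemma distA_blocks (total fc : Int) (hb : fc ≠ 0) :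
    distribute_targets (some total) fc
      = List.replicate (PySem.Int.mod total fc).toNat (some (PySem.Int.floordiv total fc + 1))
        ++ List.replicate (fc - PySem.Int.mod total fc).toNat (some (PySem.Int.floordiv total fc)) := by
  unfold distribute_targets
  simp only
  set base := PySem.Int.floordiv total fc with hbase
  set r := PySem.Int.mod total fc with hr
  rw [PySem.List.foldl_append_singleton_eq_map, List.nil_append]
  rcases lt_trichotomy fc 0 with hneg | hzero | hpos
  · have h1 := PySem.Int.mod_neg_bounds (a := total) (b := fc) hneg
    rw [PySem.List.pyRange_one_eq_nil (by omega)]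
    have hr0 : r.toNat = 0 := by omega
    have hd0 : (fc - r).toNat = 0 := by omega
    simp [hr0, hd0]
  · exact absurd hzero hb
  · have h0 : (0:Int) ≤ r := PySem.Int.mod_nonneg (a := total) hpos
    have h1 : r < fc := PySem.Int.mod_lt (a := total) hpos
    rw [PySem.List.pyRange_one]
    rw [List.map_map]
    have hrw : ((fun idx => some (base + if idx < r then 1 else 0)) ∘ fun k : Nat => (0:Int) + k)
        = fun (k : Nat) => if (k : Int) < ((r.toNat : Nat) : Int) then some (base + 1) else some base := by
      funext k
      have : ((r.toNat : Nat) : Int) = r := Int.toNat_of_nonneg h0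
      by_cases hk : (k : Int) < r <;> simp [hk, this]
    rw [hrw]
    have hle : r.toNat ≤ (fc - 0).toNat := by omega
    rw [range_map_ite_blocks _ _ _ _ hle]
    have hcount : (fc - 0).toNat - r.toNat = (fc - r).toNat := by omega
    rw [hcount]

-- the ceiling share taken by B's loop, characterised
lemma share_eq (b r n : Int) (hn : 0 < n) (h0 : 0 ≤ r) (h1 : r < n) :
    -(PySem.Int.floordiv (-(b * n + r)) n) = b + (if 0 < r then 1 else 0) := by
  rw [PySem.Int.neg_floordiv_neg_eq_iff_of_pos hn]
  by_cases hr : 0 < r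
  · rw [if_pos hr]; constructor <;> nlinarith
  · rw [if_neg hr]; constructor <;> nlinarith

-- B's greedy loop produces the same two blocks
lemma pvGoB_blocks (k : Nat) : ∀ (b r n : Int) (out : List (Option Int)),
    n.toNat = k → 0 < n → 0 ≤ r → r < n →
    pvGoB (b * n + r) n out
      = out ++ List.replicate r.toNat (some (b + 1)) ++ List.replicate (n - r).toNat (some b) := by
  induction k with
  | zero => intro b r n out hk hn _ _; omega
  | succ k ih =>
    intro b r n out hk hn h0 h1
    rw [pvGoB]
    rw [dif_neg (by omega)]
    simp only
    rw [share_eq b r n hn h0 h1]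
    by_cases hr : 0 < r
    · -- share = b + 1; remaining becomes b*(n-1) + (r-1)
      rw [if_pos hr]
      have hn1 : 0 < n - 1 := by omega
      have harg : b * n + r - (b + 1) = b * (n - 1) + (r - 1) := by ring
      rw [harg, ih b (r - 1) (n - 1) _ (by omega) hn1 (by omega) (by omega)]
      have e1 : r.toNat = (r - 1).toNat + 1 := by omega
      have e2 : (n - 1 - (r - 1)).toNat = (n - r).toNat := by omega
      rw [e1, e2, List.replicate_succ]
      simp [List.append_assoc]
    · -- r = 0 : share = b; remaining becomes b*(n-1)
      rw [if_neg hr]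
      have hr0 : r = 0 := by omega
      subst hr0
      have harg : b * n + 0 - (b + 0) = b * (n - 1) + 0 := by ring
      rw [harg]
      by_cases hdone : n - 1 ≤ 0
      · have hn1 : n = 1 := by omega
        rw [pvGoB, dif_pos hdone]
        simp [hn1]
      · rw [ih b 0 (n - 1) _ (by omega) (by omega) le_rfl (by omega)]
        have e1 : (n - 0).toNat = (n - 1 - 0).toNat + 1 := by omega
        rw [e1, List.replicate_succ]
        simp [List.append_assoc]

theorem distribute_targets_spec_aux : ∀ (t : Option Int) (fc : Int),
    Pre_distribute_targets t fc → distribute_targets t fc = distribute_targets_alt t fc := by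
  intro t fc hpre
  cases t with
  | none => rfl
  | some total =>
    have hfc : fc ≠ 0 := by
      rcases hpre with h | h
      · simp at h
      · exact h
    unfold distribute_targets_alt
    simp only
    rcases lt_trichotomy fc 0 with hneg | hzero | hpos
    · -- both sides empty
      rw [distA_blocks total fc hfc]
      have h1 := PySem.Int.mod_neg_bounds (a := total) (b := fc) hneg
      rw [pvGoB, dif_pos (by omega)]
      have hr0 : (PySem.Int.mod total fc).toNat = 0 := by omega
      have hd0 : (fc - PySem.Int.mod total fc).toNat = 0 := by omega
      simp [hr0, hd0]
    · exact absurd hzero hfc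
    · have h0 : (0:Int) ≤ PySem.Int.mod total fc := PySem.Int.mod_nonneg (a := total) hpos
      have h1 : PySem.Int.mod total fc < fc := PySem.Int.mod_lt (a := total) hpos
      have hdec : total = PySem.Int.floordiv total fc * fc + PySem.Int.mod total fc :=
        (PySem.Int.floordiv_mul_add_mod total fc).symm
      have hB : pvGoB total fc []
          = List.replicate (PySem.Int.mod total fc).toNat (some (PySem.Int.floordiv total fc + 1))
            ++ List.replicate (fc - PySem.Int.mod total fc).toNat (some (PySem.Int.floordiv total fc)) := by
        conv_lhs => rw [hdec]
        rw [pvGoB_blocks fc.toNat (PySem.Int.floordiv total fc) (PySem.Int.mod total fc) fc [] rfl hpos h0 h1]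
        simp
      rw [distA_blocks total fc hfc, hB]

-- ===== VERDICT (by name: the statement is the Claim_ definition above) =====
theorem distribute_targets_spec : Claim_equal_distribute_targets := by
  intro t fc _ hpre
  exact distribute_targets_spec_aux t fc hpre
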